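-- pv_equiv track=rewrite | github.com/HemantKumar01/TestGen | JEE_Adv.py | getQuestionNum
-- ===== SOURCE A (Python) =====
-- def getQuestionNum(txt):
--     """
--     parses question number (integer part) and return integer as a string
--     """
--     txt = txt.strip()
--     if (not txt) or len(txt) == 0:
--         return ""
--
--     if txt[-1] in [".", ",", ";", ":", ")", "-"]:
--         txt = txt[:-1]
--         return getQuestionNum(txt)
--
--     if txt[0] in [".", ",", ";", ":", ")", "-"]:
--         txt = txt[1:]
--         return getQuestionNum(txt)
--
--     return txt
-- ===== SOURCE B (Python) =====
-- def getQuestionNum(txt):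
--     """
--     parses question number (integer part) and return integer as a string
--     """
--     return txt.strip(" \t\n\r.,;:)-")
-- ===== Notes on version B (the rewrite author's own statement) =====
-- stated objective: simpler
-- what changed: Replaced the end-char-at-a-time recursion (re-strip, drop one punctuation char, recurse) with a single strip call over the combined whitespace+punctuation character set.
import Mathlib
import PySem

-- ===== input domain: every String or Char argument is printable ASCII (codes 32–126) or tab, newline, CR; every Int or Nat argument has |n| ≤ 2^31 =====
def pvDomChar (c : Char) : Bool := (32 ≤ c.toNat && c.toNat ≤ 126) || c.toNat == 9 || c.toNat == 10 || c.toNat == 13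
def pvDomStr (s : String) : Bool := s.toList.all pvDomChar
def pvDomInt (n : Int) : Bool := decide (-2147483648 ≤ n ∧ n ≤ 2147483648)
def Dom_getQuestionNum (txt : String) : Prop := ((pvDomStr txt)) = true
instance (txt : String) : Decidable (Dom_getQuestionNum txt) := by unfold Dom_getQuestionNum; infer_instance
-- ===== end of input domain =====

-- B replaces A's one-end-char-at-a-time recursion by a single strip over the combined
-- whitespace+punctuation character set (simpler).

-- ===== PORT A =====
-- the punctuation list A tests membership in
def pvPunct : List Char := ['.', ',', ';', ':', ')', '-']

-- termination helper: strip never lengthens a string (cited by decreasing_by)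
theorem pvStripLen (cs : List Char) : (PySem.Chars.strip cs).length ≤ cs.length := by
  simp only [PySem.Chars.strip, PySem.Chars.lstrip, PySem.Chars.rstrip, List.length_reverse]
  calc (List.dropWhile PySem.Chars.isspace
          (List.dropWhile PySem.Chars.isspace cs).reverse).length
      ≤ (List.dropWhile PySem.Chars.isspace cs).reverse.length := List.length_dropWhile_le _ _
    _ ≤ cs.length := by
        rw [List.length_reverse]; exact List.length_dropWhile_le _ _

-- A on the character list: strip, return [] if empty, drop a trailing punctuation char and
-- recurse, else drop a leading punctuation char and recurse, else return
def getQNChars (cs : List Char) : List Char :=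
  let t := PySem.Chars.strip cs
  if h : t = [] then []
  else if pvPunct.contains (t.getLast h) then getQNChars t.dropLast
  else if pvPunct.contains (t.head h) then getQNChars t.tail
  else t
termination_by cs.length
decreasing_by
  · have h1 := pvStripLen cs
    have h2 : (PySem.Chars.strip cs).length ≠ 0 := by
      simpa [List.length_eq_zero_iff] using h
    simp only [List.length_dropLast]
    omega
  · have h1 := pvStripLen cs
    have h2 : (PySem.Chars.strip cs).length ≠ 0 := by
      simpa [List.length_eq_zero_iff] using h
    simp only [List.length_tail]
    omega

def getQuestionNum (txt : String) : String := String.ofList (getQNChars txt.toList)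

-- ===== PORT B =====
-- the combined character set handed to str.strip in Source B
def pvStripSet : String := " \t\n\r.,;:)-"

def getQuestionNum_alt (txt : String) : String := PySem.Str.stripChars txt pvStripSet

-- ===== PRECONDITION & SPEC =====
def Spec_getQuestionNum (txt : String) (out : String) : Prop := out = getQuestionNum_alt txt
instance (txt : String) (out : String) : Decidable (Spec_getQuestionNum txt out) := by unfold Spec_getQuestionNum; infer_instance

-- ===== CLAIM (what is proved, stated in full; the proofs are below) =====
def Claim_equal_getQuestionNum : Prop := ∀ (txt : String), Dom_getQuestionNum txt → Spec_getQuestionNum txt (getQuestionNum txt)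

-- ===== LEMMAS AND PROOFS =====

-- B's trimming predicate: membership in the combined character set
def pvP (c : Char) : Bool := pvStripSet.toList.contains c

-- B's result on the list side, written with pvP
theorem pvB_eq (cs : List Char) :
    PySem.Chars.stripChars cs pvStripSet.toList
      = (List.dropWhile pvP (List.dropWhile pvP cs).reverse).reverse := rfl

theorem pv_beq_toNat (c d : Char) : (c == d) = decide (c.toNat = d.toNat) := by
  by_cases h : c = d
  · subst h; simp
  · have hn : c.toNat ≠ d.toNat := by
      intro hn
      exact h (Char.ext (UInt32.toNat_inj.mp hn))
    simp [h, hn]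

-- on domain characters the combined set is exactly "Python whitespace or A's punctuation"
theorem pv_charW (c : Char) (h : pvDomChar c = true) :
    pvP c = (PySem.Chars.isspace c || pvPunct.contains c) := by
  simp only [pvP, pvStripSet, pvPunct, show (" \t\n\r.,;:)-" : String).toList =
      [' ', '\t', '\n', '\r', '.', ',', ';', ':', ')', '-'] from rfl,
    List.contains_cons, List.contains_nil, PySem.Chars.isspace, pv_beq_toNat]
  simp only [pvDomChar] at h
  simp only [Bool.or_eq_true, Bool.and_eq_true, decide_eq_true_eq, beq_iff_eq] at h
  rw [Bool.eq_iff_iff]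
  simp only [Bool.or_eq_true, Bool.and_eq_true, decide_eq_true_eq,
    show ' '.toNat = 32 from rfl, show '\t'.toNat = 9 from rfl, show '\n'.toNat = 10 from rfl,
    show '\x0d'.toNat = 13 from rfl, show '.'.toNat = 46 from rfl, show ','.toNat = 44 from rfl,
    show ';'.toNat = 59 from rfl, show ':'.toNat = 58 from rfl, show ')'.toNat = 41 from rfl,
    show '-'.toNat = 45 from rfl]
  simp only [Bool.false_eq_true, or_false]
  constructor <;> intro hx <;> omega

-- removing a front character of the combined set leaves B's result unchanged
theorem pv_front (c : Char) (l : List Char) (hc : pvP c = true) :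
    PySem.Chars.stripChars (c :: l) pvStripSet.toList
      = PySem.Chars.stripChars l pvStripSet.toList := by
  rw [pvB_eq, pvB_eq, List.dropWhile_cons, if_pos hc]

-- removing a back character of the combined set leaves B's result unchanged
theorem pv_back (c : Char) (l : List Char) (hc : pvP c = true) :
    PySem.Chars.stripChars (l ++ [c]) pvStripSet.toList
      = PySem.Chars.stripChars l pvStripSet.toList := by
  rw [pvB_eq, pvB_eq, List.dropWhile_append]
  by_cases he : (List.dropWhile pvP l).isEmpty
  · rw [if_pos he, List.isEmpty_iff.mp he]
    simp [hc]
  · rw [if_neg he, List.reverse_append, List.reverse_cons, List.reverse_nil, List.nil_append,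
      List.singleton_append, List.dropWhile_cons, if_pos hc]

-- B is invariant under Python's bare strip of the left end (on domain strings)
theorem pv_lstrip (cs : List Char) (h : ∀ c ∈ cs, pvDomChar c = true) :
    PySem.Chars.stripChars (PySem.Chars.lstrip cs) pvStripSet.toList
      = PySem.Chars.stripChars cs pvStripSet.toList := by
  induction cs with
  | nil => rfl
  | cons c l ih =>
    simp only [PySem.Chars.lstrip, List.dropWhile_cons]
    by_cases hs : PySem.Chars.isspace c
    · rw [if_pos hs]
      have hp : pvP c = true := by
        rw [pv_charW c (h c (by simp))]; simp [hs]
      rw [show List.dropWhile PySem.Chars.isspace l = PySem.Chars.lstrip l from rfl,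
        ih (fun x hx => h x (by simp [hx])), pv_front c l hp]
    · rw [if_neg hs]

-- B is invariant under Python's bare strip of the right end (on domain strings)
theorem pv_rstrip (cs : List Char) (h : ∀ c ∈ cs, pvDomChar c = true) :
    PySem.Chars.stripChars (PySem.Chars.rstrip cs) pvStripSet.toList
      = PySem.Chars.stripChars cs pvStripSet.toList := by
  induction cs using List.reverseRecOn with
  | nil => rfl
  | append_singleton l a ih =>
    simp only [PySem.Chars.rstrip, List.reverse_concat, List.dropWhile_cons]
    by_cases hs : PySem.Chars.isspace a
    · rw [if_pos hs]
      have hp : pvP a = true := by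
        rw [pv_charW a (h a (by simp))]; simp [hs]
      rw [show (List.dropWhile PySem.Chars.isspace l.reverse).reverse = PySem.Chars.rstrip l
          from rfl, ih (fun x hx => h x (by simp [hx])), pv_back a l hp]
    · rw [if_neg hs, List.reverse_cons, List.reverse_reverse]

-- B is invariant under Python's bare strip (on domain strings)
theorem pv_strip (cs : List Char) (h : ∀ c ∈ cs, pvDomChar c = true) :
    PySem.Chars.stripChars (PySem.Chars.strip cs) pvStripSet.toList
      = PySem.Chars.stripChars cs pvStripSet.toList := by
  have hy : ∀ c ∈ PySem.Chars.lstrip cs, pvDomChar c = true := fun c hc =>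
    h c ((List.dropWhile_sublist _).subset hc)
  rw [show PySem.Chars.strip cs = PySem.Chars.rstrip (PySem.Chars.lstrip cs) from rfl,
    pv_rstrip _ hy, pv_lstrip cs h]

-- membership in strip's output implies membership in its input
theorem pv_strip_mem (cs : List Char) (c : Char) (hc : c ∈ PySem.Chars.strip cs) : c ∈ cs := by
  have h1 : c ∈ (PySem.Chars.lstrip cs).reverse := by
    have := (List.dropWhile_sublist (l := (PySem.Chars.lstrip cs).reverse)
      (p := PySem.Chars.isspace)).subset
    exact this (by simpa [PySem.Chars.strip, PySem.Chars.rstrip] using hc)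
  exact (List.dropWhile_sublist _).subset (List.mem_reverse.mp h1)

-- the last character of a non-empty strip result is not Python whitespace
theorem pv_strip_last (cs : List Char) (h : PySem.Chars.strip cs ≠ []) :
    PySem.Chars.isspace ((PySem.Chars.strip cs).getLast h) = false := by
  have hd : List.dropWhile PySem.Chars.isspace (PySem.Chars.lstrip cs).reverse ≠ [] := by
    intro he
    exact h (by simp [PySem.Chars.strip, PySem.Chars.rstrip, he])
  have : (PySem.Chars.strip cs).getLast h
      = (List.dropWhile PySem.Chars.isspace (PySem.Chars.lstrip cs).reverse).head hd := by
    simp only [PySem.Chars.strip, PySem.Chars.rstrip]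
    exact List.getLast_reverse _
  rw [this]
  exact List.head_dropWhile_not _ hd

-- the head of a non-empty strip result is not Python whitespace
theorem pv_strip_head (cs : List Char) (h : PySem.Chars.strip cs ≠ []) :
    PySem.Chars.isspace ((PySem.Chars.strip cs).head h) = false := by
  have hy : PySem.Chars.lstrip cs
      = PySem.Chars.strip cs ++ (List.takeWhile PySem.Chars.isspace (PySem.Chars.lstrip cs).reverse).reverse := by
    simp only [PySem.Chars.strip, PySem.Chars.rstrip]
    rw [← List.reverse_append, List.takeWhile_append_dropWhile, List.reverse_reverse]
  have hyne : PySem.Chars.lstrip cs ≠ [] := by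
    rw [hy]; intro he; exact h (List.append_eq_nil_iff.mp he).1
  have h? : (PySem.Chars.lstrip cs).head? = (PySem.Chars.strip cs).head? := by
    rw [hy]; exact List.head?_append_of_ne_nil _ h
  have hh : (PySem.Chars.strip cs).head h = (PySem.Chars.lstrip cs).head hyne :=
    (Option.some.inj ((List.head?_eq_some_head hyne).symm.trans
      (h?.trans (List.head?_eq_some_head h)))).symm
  rw [hh]
  exact List.head_dropWhile_not _ hyne

-- main invariant: A's recursion computes B's single combined strip (on domain strings)
theorem pv_main : ∀ (n : Nat) (cs : List Char), cs.length ≤ n →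
    (∀ c ∈ cs, pvDomChar c = true) →
    getQNChars cs = PySem.Chars.stripChars cs pvStripSet.toList := by
  intro n
  induction n with
  | zero =>
    intro cs hlen _
    have : cs = [] := List.length_eq_zero_iff.mp (Nat.le_zero.mp hlen)
    subst this
    rw [getQNChars]
    simp [PySem.Chars.strip, PySem.Chars.lstrip, PySem.Chars.rstrip, PySem.Chars.stripChars]
  | succ n ih =>
    intro cs hlen hdom
    have hdomt : ∀ c ∈ PySem.Chars.strip cs, pvDomChar c = true := fun c hc =>
      hdom c (pv_strip_mem cs c hc)
    have hB : PySem.Chars.stripChars cs pvStripSet.toList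
        = PySem.Chars.stripChars (PySem.Chars.strip cs) pvStripSet.toList :=
      (pv_strip cs hdom).symm
    rw [getQNChars, hB]
    set t := PySem.Chars.strip cs with ht
    by_cases h : t = []
    · rw [dif_pos h, h]; rfl
    · rw [dif_neg h]
      have hlt : t.length ≤ cs.length := pvStripLen cs
      have htne : t.length ≠ 0 := by simpa [List.length_eq_zero_iff] using h
      by_cases h1 : pvPunct.contains (t.getLast h) = true
      · rw [if_pos h1]
        have hplast : pvP (t.getLast h) = true := by
          rw [pv_charW _ (hdomt _ (List.getLast_mem h))]
          simp only [Bool.or_eq_true]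
          exact Or.inr h1
        have hrec := ih t.dropLast (by simp only [List.length_dropLast]; omega)
          (fun c hc => hdomt c ((List.dropLast_sublist t).subset hc))
        rw [hrec, ← pv_back _ _ hplast, List.dropLast_concat_getLast h]
      · rw [if_neg h1]
        by_cases h2 : pvPunct.contains (t.head h) = true
        · rw [if_pos h2]
          have hphead : pvP (t.head h) = true := by
            rw [pv_charW _ (hdomt _ (List.head_mem h))]
            simp only [Bool.or_eq_true]
            exact Or.inr h2
          have hrec := ih t.tail (by simp only [List.length_tail]; omega)
            (fun c hc => hdomt c ((List.tail_sublist t).subset hc))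
          rw [hrec, ← pv_front _ _ hphead, List.cons_head_tail h]
        · rw [if_neg h2]
          -- both ends of t fail the combined predicate, so B's strip is the identity on t
          have hph : pvP (t.head h) = false := by
            rw [pv_charW _ (hdomt _ (List.head_mem h))]
            rw [Bool.or_eq_false_iff]
            exact ⟨pv_strip_head cs h, Bool.eq_false_iff.mpr h2⟩
          have hpl : pvP (t.getLast h) = false := by
            rw [pv_charW _ (hdomt _ (List.getLast_mem h))]
            rw [Bool.or_eq_false_iff]
            exact ⟨pv_strip_last cs h, Bool.eq_false_iff.mpr h1⟩
          rw [pvB_eq]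
          have hd1 : List.dropWhile pvP t = t := by
            conv_lhs => rw [← List.cons_head_tail h]
            rw [List.dropWhile_cons, if_neg (by simp [hph]), List.cons_head_tail h]
          rw [hd1]
          have hrne : t.reverse ≠ [] := by simpa using h
          have hd2 : List.dropWhile pvP t.reverse = t.reverse := by
            conv_lhs => rw [← List.cons_head_tail hrne]
            rw [List.dropWhile_cons, if_neg (by rw [List.head_reverse]; simp [hpl]),
              List.cons_head_tail hrne]
          rw [hd2, List.reverse_reverse]

-- ===== VERDICT (by name: the statement is the Claim_ definition above) =====
theorem getQuestionNum_spec : Claim_equal_getQuestionNum := by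
  intro txt hdom
  unfold Spec_getQuestionNum getQuestionNum getQuestionNum_alt
  rw [show PySem.Str.stripChars txt pvStripSet
    = String.ofList (PySem.Chars.stripChars txt.toList pvStripSet.toList) from rfl]
  congr 1
  have hall : ∀ c ∈ txt.toList, pvDomChar c = true := by
    have := hdom
    unfold Dom_getQuestionNum pvDomStr at this
    exact fun c hc => List.all_eq_true.mp this c hc
  exact pv_main txt.toList.length txt.toList le_rfl hall
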